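-- pv_equiv track=rewrite | github.com/pabloschwarzenberg/grader | hito2_ej3/hito2_ej3_2a9aa0de8984111bc3b5ec6fd3677d16.py | SubsecuenciaADN
-- ===== SOURCE A (Python) =====
-- def SubsecuenciaADN(secuencia, n):
--
-- 	frecuencia={}
--
-- 	for i in range(len(secuencia)-n+1):
--
-- 		subsecuencia=secuencia[i:i+n]
--
-- 		if subsecuencia in frecuencia:
--
-- 			frecuencia[subsecuencia]+=1
--
-- 		else:
--
-- 			frecuencia[subsecuencia]=1
--
-- 	subsecuencias=[subsecuencia for subsecuencia, count in frecuencia.items() if count==1]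
--
-- 	return subsecuencias
-- ===== SOURCE B (Python) =====
-- def SubsecuenciaADN(secuencia, n):
--     # One pass: maintain counts and an insertion-ordered set of currently-unique
--     # substrings (dict keys); add on first sight, delete on second, so no
--     # second filtering pass over the counter is needed.
--     counts = {}
--     unicas = {}
--     for i in range(len(secuencia) - n + 1):
--         sub = secuencia[i:i + n]
--         c = counts.get(sub, 0)
--         if c == 0:
--             unicas[sub] = True
--         elif c == 1:
--             del unicas[sub]
--         counts[sub] = c + 1
--     return list(unicas)
-- ===== Notes on version B (the rewrite author's own statement) =====
-- stated objective: alternative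
-- what changed: A counts every substring in a dict and then makes a second filtering pass over the counter's items; B does a single pass that maintains, next to the counts, an insertion-ordered set of currently-unique substrings (added on first sight, deleted on second), returning its keys with no second pass.
import Mathlib
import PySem

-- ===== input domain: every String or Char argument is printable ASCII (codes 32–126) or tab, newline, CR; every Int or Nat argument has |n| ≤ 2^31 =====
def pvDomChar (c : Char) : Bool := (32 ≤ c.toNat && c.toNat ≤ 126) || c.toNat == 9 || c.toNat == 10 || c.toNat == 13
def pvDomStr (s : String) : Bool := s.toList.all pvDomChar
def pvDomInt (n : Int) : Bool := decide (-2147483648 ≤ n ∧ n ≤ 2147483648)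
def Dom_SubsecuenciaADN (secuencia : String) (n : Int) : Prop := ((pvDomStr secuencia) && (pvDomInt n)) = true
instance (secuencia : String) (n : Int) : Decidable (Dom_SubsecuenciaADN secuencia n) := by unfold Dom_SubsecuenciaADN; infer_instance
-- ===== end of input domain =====

-- B replaces A's count-then-filter (a second pass over the counter's items) by a single pass
-- maintaining the insertion-ordered set of currently-unique substrings (add on first sight,
-- delete on second); same return value, alternative decomposition.

-- ===== PORT A =====
def SubsecuenciaADN (secuencia : String) (n : Int) : List String :=
  let frecuencia :=
    (PySem.List.pyRange 0 (PySem.Str.len secuencia - n + 1) 1).foldl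
      (fun (d : PySem.Dict String Int) i =>
        let subsecuencia := PySem.Str.slice secuencia (some i) (some (i + n))
        if d.contains subsecuencia then
          d.insert subsecuencia (d.getD subsecuencia 0 + 1)
        else
          d.insert subsecuencia 1)
      PySem.Dict.empty
  (frecuencia.items.filter (fun p => p.2 == 1)).map (fun p => p.1)

-- ===== PORT B =====
def SubsecuenciaADN_alt (secuencia : String) (n : Int) : List String :=
  let st :=
    (PySem.List.pyRange 0 (PySem.Str.len secuencia - n + 1) 1).foldl
      (fun (st : PySem.Dict String Int × PySem.Dict String Bool) i =>
        let sub := PySem.Str.slice secuencia (some i) (some (i + n))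
        let c := st.1.getD sub 0
        let unicas :=
          if c == 0 then st.2.insert sub true
          else if c == 1 then st.2.erase sub  -- `del unicas[sub]`: the key is present whenever this branch runs, where `del` = erase
          else st.2
        (st.1.insert sub (c + 1), unicas))
      (PySem.Dict.empty, PySem.Dict.empty)
  st.2.keys

-- ===== PRECONDITION & SPEC =====
def Spec_SubsecuenciaADN (secuencia : String) (n : Int) (out : List String) : Prop := out = SubsecuenciaADN_alt secuencia n
instance (secuencia : String) (n : Int) (out : List String) : Decidable (Spec_SubsecuenciaADN secuencia n out) := by unfold Spec_SubsecuenciaADN; infer_instance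

-- ===== CLAIM (what is proved, stated in full; the proofs are below) =====
def Claim_equal_SubsecuenciaADN : Prop := ∀ (secuencia : String) (n : Int), Dom_SubsecuenciaADN secuencia n → Spec_SubsecuenciaADN secuencia n (SubsecuenciaADN secuencia n)

-- ===== LEMMAS AND PROOFS =====

-- the list of substrings the loop slices out, in loop order
def pvSubs (secuencia : String) (n : Int) : List String :=
  (PySem.List.pyRange 0 (PySem.Str.len secuencia - n + 1) 1).map
    (fun i => PySem.Str.slice secuencia (some i) (some (i + n)))

-- the unique-substring predicate both programs realise
def pvPred (l : List String) (k : String) : Bool := ((l.count k : Int) == 1)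

-- B's ordered-set state after scanning the substring list l
def pvU (l : List String) : PySem.Dict String Bool :=
  PySem.Dict.mk (((PySem.Set.ofList l).filter (pvPred l)).map (fun k => (k, true)))

lemma pvA_step (d : PySem.Dict String Int) (sub : String) :
    (if d.contains sub then d.insert sub (d.getD sub 0 + 1) else d.insert sub 1)
      = d.insert sub (d.getD sub 0 + 1) := by
  split_ifs with h
  · rfl
  · rw [PySem.Dict.getD_of_not_contains d 0 (by simpa using h)]; norm_num

lemma pvA_eq_filter (secuencia : String) (n : Int) :
    SubsecuenciaADN secuencia n
      = (PySem.Set.ofList (pvSubs secuencia n)).filter (pvPred (pvSubs secuencia n)) := by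
  unfold SubsecuenciaADN
  have h1 : (PySem.List.pyRange 0 (PySem.Str.len secuencia - n + 1) 1).foldl
      (fun (d : PySem.Dict String Int) i =>
        let subsecuencia := PySem.Str.slice secuencia (some i) (some (i + n))
        if d.contains subsecuencia then
          d.insert subsecuencia (d.getD subsecuencia 0 + 1)
        else
          d.insert subsecuencia 1)
      PySem.Dict.empty = PySem.Dict.counter (pvSubs secuencia n) := by
    rw [← PySem.Dict.foldl_insert_getD_add_one_eq_counter, pvSubs, List.foldl_map]
    simp only [pvA_step]
  simp only [h1, PySem.Dict.items_counter, List.filter_map, List.map_map]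
  simp [Function.comp_def]; rfl

lemma pvU_contains (l : List String) (x : String) :
    (pvU l).contains x = true → x ∈ l := by
  intro h
  simp only [pvU, PySem.Dict.contains, List.any_eq_true] at h
  obtain ⟨p, hp, hbeq⟩ := h
  obtain ⟨k, hk, rfl⟩ := List.mem_map.mp hp
  have hkl := (PySem.Set.mem_ofList l k).mp (List.mem_filter.mp hk).1
  have : k = x := by simpa using hbeq
  exact this ▸ hkl

lemma pvOfList_append (l : List String) (x : String) :
    PySem.Set.ofList (l ++ [x]) = PySem.Set.add (PySem.Set.ofList l) x := by
  rw [PySem.Set.ofList_eq_foldl, PySem.Set.ofList_eq_foldl, List.foldl_append]; rfl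

lemma pvU_step (l : List String) (x : String) :
    (if ((l.count x : Int) == 0) then (pvU l).insert x true
     else if ((l.count x : Int) == 1) then (pvU l).erase x
     else pvU l) = pvU (l ++ [x]) := by
  by_cases h0 : l.count x = 0
  · have hx : x ∉ l := List.count_eq_zero.mp h0
    have hadd : PySem.Set.ofList (l ++ [x]) = PySem.Set.ofList l ++ [x] := by
      rw [pvOfList_append]
      simp [PySem.Set.add, PySem.Set.contains, (PySem.Set.mem_ofList l x).not.mpr hx]
    have hcon : (pvU l).contains x = false := by
      by_contra hc
      exact hx (pvU_contains l x (by simpa using hc))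
    rw [if_pos (by simpa using h0)]
    apply PySem.Dict.ext
    rw [PySem.Dict.items_insert_of_not_contains _ _ hcon]
    show (((PySem.Set.ofList l).filter (pvPred l)).map (fun k => (k, true))) ++ [(x, true)]
      = ((PySem.Set.ofList (l ++ [x])).filter (pvPred (l ++ [x]))).map (fun k => (k, true))
    rw [hadd, List.filter_append, List.map_append]
    congr 1
    · congr 1
      apply List.filter_congr
      intro k hk
      have hkx : x ≠ k := fun he => hx (he ▸ (PySem.Set.mem_ofList l k).mp hk)
      simp [pvPred, hkx]
    · simp [pvPred, h0]
  · rw [if_neg (by simpa using h0)]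
    have hxl : x ∈ l := by
      by_contra hx; exact h0 (List.count_eq_zero.mpr hx)
    have hadd : PySem.Set.ofList (l ++ [x]) = PySem.Set.ofList l := by
      rw [pvOfList_append]
      simp [PySem.Set.add, PySem.Set.contains, (PySem.Set.mem_ofList l x).mpr hxl]
    by_cases h1 : l.count x = 1
    · rw [if_pos (by simpa using h1)]
      apply PySem.Dict.ext
      show (((PySem.Set.ofList l).filter (pvPred l)).map (fun k => (k, true))).filter
          (fun p => !(p.1 == x))
        = ((PySem.Set.ofList (l ++ [x])).filter (pvPred (l ++ [x]))).map (fun k => (k, true))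
      rw [hadd, List.filter_map, List.filter_filter]
      congr 1
      apply List.filter_congr
      intro k _
      by_cases hkx : k = x
      · subst hkx
        simp [pvPred, h1]
      · simp [pvPred, hkx, Ne.symm hkx]
    · rw [if_neg (by simpa using h1)]
      apply PySem.Dict.ext
      show (((PySem.Set.ofList l).filter (pvPred l)).map (fun k => (k, true)))
        = ((PySem.Set.ofList (l ++ [x])).filter (pvPred (l ++ [x]))).map (fun k => (k, true))
      rw [hadd]
      congr 1
      apply List.filter_congr
      intro k _
      by_cases hkx : k = x
      · subst hkx
        simp [pvPred]
        omega
      · simp [pvPred, Ne.symm hkx]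

lemma pvCounter_step (l : List String) (x : String) :
    (PySem.Dict.counter l).insert x ((PySem.Dict.counter l).getD x 0 + 1)
      = PySem.Dict.counter (l ++ [x]) := by
  rw [← PySem.Dict.foldl_insert_getD_add_one_eq_counter l,
      ← PySem.Dict.foldl_insert_getD_add_one_eq_counter (l ++ [x]), List.foldl_append]
  rfl

lemma pvB_fold (rest : List String) : ∀ (l : List String),
    rest.foldl
      (fun (st : PySem.Dict String Int × PySem.Dict String Bool) sub =>
        let c := st.1.getD sub 0
        let unicas :=
          if c == 0 then st.2.insert sub true
          else if c == 1 then st.2.erase sub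
          else st.2
        (st.1.insert sub (c + 1), unicas))
      (PySem.Dict.counter l, pvU l)
      = (PySem.Dict.counter (l ++ rest), pvU (l ++ rest)) := by
  induction rest with
  | nil => intro l; simp
  | cons x rs ih =>
    intro l
    rw [List.foldl_cons]
    have hstep :
        ((PySem.Dict.counter l).insert x ((PySem.Dict.counter l).getD x 0 + 1),
          if (PySem.Dict.counter l).getD x 0 == 0 then (pvU l).insert x true
          else if (PySem.Dict.counter l).getD x 0 == 1 then (pvU l).erase x
          else pvU l)
        = (PySem.Dict.counter (l ++ [x]), pvU (l ++ [x])) := by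
      rw [pvCounter_step, PySem.Dict.getD_counter, pvU_step]
    show List.foldl _ ((PySem.Dict.counter l).insert x ((PySem.Dict.counter l).getD x 0 + 1),
          if (PySem.Dict.counter l).getD x 0 == 0 then (pvU l).insert x true
          else if (PySem.Dict.counter l).getD x 0 == 1 then (pvU l).erase x
          else pvU l) rs = _
    rw [hstep, ih (l ++ [x])]
    simp

lemma pvB_eq_filter (secuencia : String) (n : Int) :
    SubsecuenciaADN_alt secuencia n
      = (PySem.Set.ofList (pvSubs secuencia n)).filter (pvPred (pvSubs secuencia n)) := by
  unfold SubsecuenciaADN_alt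
  have h := pvB_fold (pvSubs secuencia n) []
  simp only [List.nil_append] at h
  rw [pvSubs, List.foldl_map] at h
  show (List.foldl _ (PySem.Dict.empty, PySem.Dict.empty)
      (PySem.List.pyRange 0 (PySem.Str.len secuencia - n + 1) 1)).2.keys = _
  have hinit : ((PySem.Dict.empty : PySem.Dict String Int), (PySem.Dict.empty : PySem.Dict String Bool))
      = (PySem.Dict.counter [], pvU []) := rfl
  rw [hinit, h]
  show (pvU (pvSubs secuencia n)).keys = _
  simp [pvU, PySem.Dict.keys, Function.comp_def]

-- ===== VERDICT (by name: the statement is the Claim_ definition above) =====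
theorem SubsecuenciaADN_spec : Claim_equal_SubsecuenciaADN := by
  intro secuencia n _
  unfold Spec_SubsecuenciaADN
  rw [pvA_eq_filter, pvB_eq_filter]
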